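-- pv_equiv track=rewrite | github.com/XianghuWang-287/MSGFPLUS_search_workflow | bin/cluster_eval_compare_BD.py | assign_size_range_bin
-- ===== SOURCE A (Python) =====
-- def assign_size_range_bin(size):
--     if size == 1:
--         return '1'
--     else:
--         upper_limit = 2
--         while size > upper_limit:
--             upper_limit *= 2
--         return f"{upper_limit//2+1} to {upper_limit}"
-- ===== SOURCE B (Python) =====
-- def assign_size_range_bin(size):
--     if size == 1:
--         return '1'
--     upper = 2 if size <= 2 else 1 << (size - 1).bit_length()
--     return f"{upper//2+1} to {upper}"
-- ===== Notes on version B (the rewrite author's own statement) =====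
-- stated objective: faster
-- what changed: Replaces the doubling while-loop search for the next power of two with a closed-form bit_length/shift computation (with a guard reproducing the '2 to 2' bin for size <= 2).
import Mathlib
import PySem

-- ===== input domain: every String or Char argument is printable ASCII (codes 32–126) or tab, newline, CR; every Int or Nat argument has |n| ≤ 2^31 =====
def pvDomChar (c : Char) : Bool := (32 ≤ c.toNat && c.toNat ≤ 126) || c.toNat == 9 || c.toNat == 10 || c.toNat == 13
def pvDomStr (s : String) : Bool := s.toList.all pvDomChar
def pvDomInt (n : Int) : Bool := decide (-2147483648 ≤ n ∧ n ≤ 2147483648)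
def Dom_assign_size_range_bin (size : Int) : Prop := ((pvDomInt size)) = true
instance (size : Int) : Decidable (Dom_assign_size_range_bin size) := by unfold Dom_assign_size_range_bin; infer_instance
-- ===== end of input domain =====

-- B replaces A's doubling while-loop with a closed-form bit-length/shift computation (O(1) arithmetic instead of O(log size) iterations).
-- ===== PORT A =====
-- while size > upper_limit: upper_limit *= 2
-- (fuel only makes the loop total; bitLength size + 2 iterations always suffice — proved below)
def assignLoopA (fuel : Nat) (size upper : Int) : Int :=
  match fuel with
  | 0 => upper
  | f + 1 => if size > upper then assignLoopA f size (upper * 2) else upper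

def assign_size_range_bin (size : Int) : String :=
  if size == 1 then "1"
  else
    let upper_limit := assignLoopA (PySem.Int.bitLength size + 2) size 2
    PySem.Int.toStr (PySem.Int.floordiv upper_limit 2 + 1) ++ " to " ++ PySem.Int.toStr upper_limit

-- ===== PORT B =====
def assign_size_range_bin_alt (size : Int) : String :=
  if size == 1 then "1"
  else
    let upper : Int := if size ≤ 2 then 2 else 2 ^ (PySem.Int.bitLength (size - 1))
    PySem.Int.toStr (PySem.Int.floordiv upper 2 + 1) ++ " to " ++ PySem.Int.toStr upper

-- ===== PRECONDITION & SPEC =====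
def Spec_assign_size_range_bin (size : Int) (out : String) : Prop := out = assign_size_range_bin_alt size
instance (size : Int) (out : String) : Decidable (Spec_assign_size_range_bin size out) := by unfold Spec_assign_size_range_bin; infer_instance

-- ===== CLAIM (what is proved, stated in full; the proofs are below) =====
def Claim_equal_assign_size_range_bin : Prop := ∀ (size : Int), Dom_assign_size_range_bin size → Spec_assign_size_range_bin size (assign_size_range_bin size)

-- ===== LEMMAS AND PROOFS =====

-- ===== VERDICT (by name: the statement is the Claim_ definition above) =====
-- the loop returns its argument once size ≤ upper (any fuel)
theorem loopA_done (fuel : Nat) (size upper : Int) (hle : size ≤ upper) :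
    assignLoopA fuel size upper = upper := by
  cases fuel with
  | zero => rfl
  | succ f => unfold assignLoopA; simp [show ¬ size > upper by omega]

theorem int_pow_lt_pow (a b : Nat) (h : (2:Int) ^ a < 2 ^ b) : a < b := by
  by_contra hc
  have : (2:Int) ^ b ≤ 2 ^ a := pow_le_pow_right₀ (by norm_num) (by omega)
  omega

-- key: from 2^j (below size), with enough fuel, the loop lands on the least power of two ≥ size
theorem loopA_pow (size : Int) (m : Nat) (hlb : (2:Int) ^ m < size) (hub : size ≤ 2 ^ (m+1)) :
    ∀ (fuel j : Nat), m - j < fuel → (2:Int) ^ j < size →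
      assignLoopA fuel size ((2:Int) ^ j) = 2 ^ (m+1) := by
  have hjm : ∀ j : Nat, (2:Int) ^ j < size → j ≤ m := by
    intro j hj
    have : (2:Int) ^ j < 2 ^ (m+1) := by omega
    have := int_pow_lt_pow _ _ this
    omega
  intro fuel
  induction fuel with
  | zero => intro j hf hlt; omega
  | succ f ih =>
    intro j hf hlt
    unfold assignLoopA
    rw [if_pos (show size > 2 ^ j by omega)]
    have hp : (2:Int) ^ j * 2 = 2 ^ (j+1) := by ring
    by_cases hlt2 : (2:Int) ^ (j+1) < size
    · have hj1 := hjm (j+1) hlt2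
      have hrec := ih (j+1) (by omega) hlt2
      simp only [hp]
      exact hrec
    · have hj : j = m := by
        have h1 := hjm j hlt
        have h2 : (2:Int) ^ m < 2 ^ (j+1) := by omega
        have := int_pow_lt_pow _ _ h2
        omega
      subst hj
      simp only [hp]
      exact loopA_done _ _ _ (by omega)

-- bitLength bounds for the B side: for size ≥ 3, with bl = bitLength (size-1),
-- we have 2^(bl-1) ≤ size-1 < 2^bl, i.e. 2^(bl-1) < size ≤ 2^bl.
theorem bitLength_bounds (size : Int) (h3 : 3 ≤ size) :
    ∃ m : Nat, PySem.Int.bitLength (size - 1) = m + 1 ∧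
      (2:Int) ^ m < size ∧ size ≤ 2 ^ (m+1) := by
  set n := size - 1 with hn
  have hne : n ≠ 0 := by omega
  have h1 := PySem.Int.lt_two_pow_bitLength n
  have h2 := PySem.Int.two_pow_bitLength_le n hne
  have hbl : 1 ≤ PySem.Int.bitLength n := by
    by_contra hc
    have h0 : PySem.Int.bitLength n = 0 := by omega
    rw [h0] at h1
    omega
  refine ⟨PySem.Int.bitLength n - 1, by omega, ?_, ?_⟩
  · have : (2:Int) ^ (PySem.Int.bitLength n - 1) ≤ n := by
      calc (2:Int) ^ (PySem.Int.bitLength n - 1)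
          = ((2 ^ (PySem.Int.bitLength n - 1) : Nat) : Int) := by push_cast; ring
        _ ≤ (n.natAbs : Int) := by exact_mod_cast h2
        _ = n := by omega
    omega
  · have : n < (2:Int) ^ PySem.Int.bitLength n := by
      calc n ≤ (n.natAbs : Int) := by omega
        _ < ((2 ^ PySem.Int.bitLength n : Nat) : Int) := by exact_mod_cast h1
        _ = (2:Int) ^ PySem.Int.bitLength n := by push_cast; ring
    have he : PySem.Int.bitLength n - 1 + 1 = PySem.Int.bitLength n := by omega
    rw [he]
    omega

theorem assign_size_range_bin_spec : Claim_equal_assign_size_range_bin := by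
  intro size _
  unfold Spec_assign_size_range_bin assign_size_range_bin assign_size_range_bin_alt
  by_cases h1 : size = 1
  · simp [h1]
  · rw [if_neg (by simpa using h1), if_neg (by simpa using h1)]
    by_cases h2 : size ≤ 2
    · rw [if_pos h2]
      have : assignLoopA (PySem.Int.bitLength size + 2) size 2 = 2 := loopA_done _ _ _ h2
      simp only [this]
    · rw [if_neg h2]
      obtain ⟨m, hbl, hlb, hub⟩ := bitLength_bounds size (by omega)
      have hm : m < PySem.Int.bitLength size := by
        have h1' := PySem.Int.lt_two_pow_bitLength size
        have hcast : (size.natAbs : Int) = size := by omega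
        have : (2:Int) ^ m < 2 ^ (PySem.Int.bitLength size) := by
          calc (2:Int) ^ m < size := hlb
            _ = (size.natAbs : Int) := hcast.symm
            _ < ((2 ^ PySem.Int.bitLength size : Nat) : Int) := by exact_mod_cast h1'
            _ = (2:Int) ^ PySem.Int.bitLength size := by push_cast; ring
        exact int_pow_lt_pow _ _ this
      have hloop : assignLoopA (PySem.Int.bitLength size + 2) size 2 = 2 ^ (m+1) := by
        have := loopA_pow size m hlb hub (PySem.Int.bitLength size + 2) 1 (by omega) (by omega)
        simpa using this
      rw [hloop, hbl]
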